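-- pv_equiv track=rewrite | github.com/cannedoxygen/sol_van_gen | core/key_utils.py | is_valid_vanity_pattern
-- ===== SOURCE A (Python) =====
-- def is_valid_vanity_pattern(pattern: str) -> bool:
--     """
--     Check if a vanity pattern is valid
--
--     Args:
--         pattern: Vanity pattern to check
--
--     Returns:
--         bool: True if the pattern is valid
--     """
--     try:
--         # Check if pattern contains only Base58 characters
--         base58_chars = set("123456789ABCDEFGHJKLMNPQRSTUVWXYZabcdefghijkmnopqrstuvwxyz")
--         for char in pattern:
--             if char not in base58_chars:
--                 return False
--         return True
--     except:
--         return False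
-- ===== SOURCE B (Python) =====
-- import re
--
-- _BASE58_RE = re.compile(r'[1-9A-HJ-NP-Za-km-z]*\Z')
--
-- def is_valid_vanity_pattern(pattern: str) -> bool:
--     """
--     Check if a vanity pattern is valid
--
--     Args:
--         pattern: Vanity pattern to check
--
--     Returns:
--         bool: True if the pattern is valid
--     """
--     try:
--         return _BASE58_RE.match(pattern) is not None
--     except:
--         return False
-- ===== Notes on version B (the rewrite author's own statement) =====
-- stated objective: idiomatic
-- what changed: Replaces the per-character set-membership loop with a single precompiled regular-expression match over the Base58 character class.
import Mathlib
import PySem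

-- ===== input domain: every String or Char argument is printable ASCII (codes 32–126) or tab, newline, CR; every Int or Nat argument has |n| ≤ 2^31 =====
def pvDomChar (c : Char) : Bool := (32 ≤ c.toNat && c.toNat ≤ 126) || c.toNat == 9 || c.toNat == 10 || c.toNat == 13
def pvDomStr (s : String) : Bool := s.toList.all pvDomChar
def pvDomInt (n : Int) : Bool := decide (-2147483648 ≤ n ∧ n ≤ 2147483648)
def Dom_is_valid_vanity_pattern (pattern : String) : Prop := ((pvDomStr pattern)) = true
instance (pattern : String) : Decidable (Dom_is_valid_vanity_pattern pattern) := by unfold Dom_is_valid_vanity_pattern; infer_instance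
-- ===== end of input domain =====

-- B replaces A's per-character set-membership loop with a single regular-expression
-- match over the Base58 character class (ported here, exactly, as a character-range
-- class test); objective: more idiomatic, same cost.


-- ===== PORT A =====
-- base58_chars = set("123456789ABCDEFGHJKLMNPQRSTUVWXYZabcdefghijkmnopqrstuvwxyz")
-- (the string literal is written out as its character list so membership unfolds)
def pvBase58Set : PySem.Set Char :=
  PySem.Set.ofList ['1', '2', '3', '4', '5', '6', '7', '8', '9', 'A', 'B', 'C', 'D', 'E', 'F', 'G', 'H', 'J', 'K', 'L', 'M', 'N', 'P', 'Q', 'R', 'S', 'T', 'U', 'V', 'W', 'X', 'Y', 'Z', 'a', 'b', 'c', 'd', 'e', 'f', 'g', 'h', 'i', 'j', 'k', 'm', 'n', 'o', 'p', 'q', 'r', 's', 't', 'u', 'v', 'w', 'x', 'y', 'z']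

-- the for-loop with early 'return False'
def pvLoopA : List Char → Bool
  | [] => true
  | c :: rest => if c ∈ pvBase58Set then pvLoopA rest else false

def is_valid_vanity_pattern (pattern : String) : Bool :=
  pvLoopA pattern.toList

-- ===== PORT B =====
-- the regex character class [1-9A-HJ-NP-Za-km-z], ported exactly as its range test
def pvB58Class (c : Char) : Bool :=
  ('1' ≤ c && c ≤ '9') || ('A' ≤ c && c ≤ 'H') || ('J' ≤ c && c ≤ 'N') ||
  ('P' ≤ c && c ≤ 'Z') || ('a' ≤ c && c ≤ 'k') || ('m' ≤ c && c ≤ 'z')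

-- _BASE58_RE.match(pattern) is not None: the whole string matches the class*
def is_valid_vanity_pattern_alt (pattern : String) : Bool :=
  pattern.toList.all pvB58Class

-- ===== PRECONDITION & SPEC =====
def Spec_is_valid_vanity_pattern (pattern : String) (out : Bool) : Prop := out = is_valid_vanity_pattern_alt pattern
instance (pattern : String) (out : Bool) : Decidable (Spec_is_valid_vanity_pattern pattern out) := by unfold Spec_is_valid_vanity_pattern; infer_instance

-- ===== CLAIM (what is proved, stated in full; the proofs are below) =====
def Claim_equal_is_valid_vanity_pattern : Prop := ∀ (pattern : String), Dom_is_valid_vanity_pattern pattern → Spec_is_valid_vanity_pattern pattern (is_valid_vanity_pattern pattern)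

-- ===== LEMMAS AND PROOFS =====
theorem pvMemClass (c : Char) : (c ∈ pvBase58Set) ↔ pvB58Class c = true := by
  simp only [pvBase58Set, pvB58Class, PySem.Set.mem_ofList]
  simp [Char.ext_iff, UInt32.ext_iff, Char.le_def, UInt32.le_iff_toNat_le]
  omega

theorem pvLoopA_all (l : List Char) : pvLoopA l = l.all pvB58Class := by
  induction l with
  | nil => rfl
  | cons c rest ih =>
      simp only [pvLoopA, List.all_cons]
      by_cases h : c ∈ pvBase58Set
      · simp [h, (pvMemClass c).mp h, ih]
      · simp [h, (not_iff_not.mpr (pvMemClass c)).mp h]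

-- ===== VERDICT (by name: the statement is the Claim_ definition above) =====
theorem is_valid_vanity_pattern_spec : Claim_equal_is_valid_vanity_pattern := by
  intro pattern _
  unfold Spec_is_valid_vanity_pattern is_valid_vanity_pattern is_valid_vanity_pattern_alt
  exact pvLoopA_all _
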